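-- pv_equiv track=rewrite | github.com/CCarito/codeabbey | 149_prime_chains.py | find_prime_chain
-- ===== SOURCE A (Python) =====
-- def is_prime(n):
--     if n <= 1:
--         return False
--     if n <= 3:
--         return True
--     if n % 2 == 0 or n % 3 == 0:
--         return False
--     i = 5
--     while i * i <= n:
--         if n % i == 0 or n % (i + 2) == 0:
--             return False
--         i += 6
--     return True
--
-- def find_prime_chain(hash_value):
--     prime_chain = ""
--     current_number = 2
--     while len(prime_chain) < 48:
--         if is_prime(current_number):
--             prime_chain += str(current_number)
--             current_hash = calculate_hash(prime_chain)
--             if current_hash == hash_value: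
--                 return prime_chain
--         current_number += 1
--     return ""
--
-- def calculate_hash(number):
--     hash_value = 0
--     for digit in number:
--         hash_value = (hash_value * 13 + int(digit)) % 100000007
--     return hash_value
-- ===== SOURCE B (Python) =====
-- def is_prime(n):
--     if n < 2:
--         return False
--     d = 2
--     while d * d <= n:
--         if n % d == 0:
--             return False
--         d += 1
--     return True
--
-- def find_prime_chain(hash_value):
--     chain = ""
--     h = 0
--     length = 0
--     current_number = 2
--     while length < 48:
--         if is_prime(current_number):
--             s = str(current_number)
--             for digit in s:
--                 h = (h * 13 + int(digit)) % 100000007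
--                 length += 1
--             chain += s
--             if h == hash_value:
--                 return chain
--         current_number += 1
--     return ""
-- ===== Notes on version B (the rewrite author's own statement) =====
-- stated objective: simpler
-- what changed: B maintains a running hash and running length (folding each digit of the new prime into h) instead of re-running calculate_hash over the whole rebuilt chain at every prime, and tests primality by plain trial division instead of the wheel-based test.
import Mathlib
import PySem

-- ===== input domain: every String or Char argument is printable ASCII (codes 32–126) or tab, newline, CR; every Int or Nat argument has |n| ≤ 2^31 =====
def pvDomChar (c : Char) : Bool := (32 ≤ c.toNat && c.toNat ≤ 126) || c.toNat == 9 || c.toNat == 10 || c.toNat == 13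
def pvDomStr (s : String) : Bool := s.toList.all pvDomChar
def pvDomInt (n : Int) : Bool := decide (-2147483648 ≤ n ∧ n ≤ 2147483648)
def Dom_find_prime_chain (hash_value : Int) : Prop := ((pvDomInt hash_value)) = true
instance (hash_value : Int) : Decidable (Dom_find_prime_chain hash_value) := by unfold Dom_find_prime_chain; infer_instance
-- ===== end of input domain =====

-- B maintains a running hash and length per digit instead of rebuilding calculate_hash over the whole
-- chain at each prime, and tests primality by plain trial division instead of the wheel-based test (objective: simpler).

-- int(digit) for a one-character string; exact: in both programs it is only applied to decimal digits of str(n).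
def pyIntChar (c : Char) : Int := (PySem.Int.ofChars? [c]).getD 0

-- ===== PORT A =====
-- while i*i <= n loop of is_prime; i starts at 5 and grows by 6, so n.toNat steps always suffice (fuel never runs out).
def pyIsPrimeLoop (n : Int) (i : Int) : Nat → Bool
  | 0 => true
  | fuel+1 =>
    if i * i ≤ n then
      if PySem.Int.mod n i == 0 || PySem.Int.mod n (i + 2) == 0 then false
      else pyIsPrimeLoop n (i + 6) fuel
    else true

def pyIsPrime (n : Int) : Bool :=
  if n ≤ 1 then false
  else if n ≤ 3 then true
  else if PySem.Int.mod n 2 == 0 || PySem.Int.mod n 3 == 0 then false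
  else pyIsPrimeLoop n 5 n.toNat

def calculate_hash (number : List Char) : Int :=
  number.foldl (fun hash_value digit => PySem.Int.mod (hash_value * 13 + pyIntChar digit) 100000007) 0

-- the while-loop of A; the chain gains its 48th character at current_number = 101, i.e. within 100
-- iterations from current_number = 2, so fuel 110 is never exhausted (proved implicitly by loop_eq's bound).
def chainLoopA : Nat → List Char → Int → Int → List Char
  | 0, _, _, _ => []
  | fuel+1, prime_chain, current_number, hash_value =>
    if (prime_chain.length : Int) < 48 then
      if pyIsPrime current_number then
        let prime_chain' := prime_chain ++ PySem.Int.toChars current_number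
        let current_hash := calculate_hash prime_chain'
        if current_hash == hash_value then prime_chain'
        else chainLoopA fuel prime_chain' (current_number + 1) hash_value
      else chainLoopA fuel prime_chain (current_number + 1) hash_value
    else []

def find_prime_chain (hash_value : Int) : String :=
  String.ofList (chainLoopA 110 [] 2 hash_value)

-- ===== PORT B =====
-- while d*d <= n loop of B's trial-division is_prime; d grows by 1 each step, n.toNat steps suffice.
def altIsPrimeLoop (n : Int) (d : Int) : Nat → Bool
  | 0 => true
  | fuel+1 =>
    if d * d ≤ n then
      if PySem.Int.mod n d == 0 then false
      else altIsPrimeLoop n (d + 1) fuel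
    else true

def altIsPrime (n : Int) : Bool :=
  if n < 2 then false
  else altIsPrimeLoop n 2 n.toNat

-- B's while-loop: state is (chain, running hash h, running length); same fuel bound as A's loop.
def chainLoopB : Nat → List Char → Int → Int → Int → Int → List Char
  | 0, _, _, _, _, _ => []
  | fuel+1, chain, h, length, current_number, hash_value =>
    if length < 48 then
      if altIsPrime current_number then
        let s := PySem.Int.toChars current_number
        let p := s.foldl
          (fun (p : Int × Int) digit => (PySem.Int.mod (p.1 * 13 + pyIntChar digit) 100000007, p.2 + 1))
          (h, length)
        let chain' := chain ++ s
        if p.1 == hash_value then chain'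
        else chainLoopB fuel chain' p.1 p.2 (current_number + 1) hash_value
      else chainLoopB fuel chain h length (current_number + 1) hash_value
    else []

def find_prime_chain_alt (hash_value : Int) : String :=
  String.ofList (chainLoopB 110 [] 0 0 2 hash_value)

-- ===== PRECONDITION & SPEC =====
def Spec_find_prime_chain (hash_value : Int) (out : String) : Prop := out = find_prime_chain_alt hash_value
instance (hash_value : Int) (out : String) : Decidable (Spec_find_prime_chain hash_value out) := by unfold Spec_find_prime_chain; infer_instance

-- ===== CLAIM (what is proved, stated in full; the proofs are below) =====
def Claim_equal_find_prime_chain : Prop := ∀ (hash_value : Int), Dom_find_prime_chain hash_value → Spec_find_prime_chain hash_value (find_prime_chain hash_value)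

-- ===== LEMMAS AND PROOFS =====

-- the two primality tests agree on every value current_number can take within the fuel bound
lemma prime_agree : ∀ k : Nat, k < 112 → altIsPrime (2 + (k : Int)) = pyIsPrime (2 + (k : Int)) := by
  decide

lemma calcHash_append (cs ds : List Char) :
    calculate_hash (cs ++ ds) =
      ds.foldl (fun h c => PySem.Int.mod (h * 13 + pyIntChar c) 100000007) (calculate_hash cs) := by
  simp [calculate_hash, List.foldl_append]

lemma loop_eq : ∀ (fuel : Nat) (chain : List Char) (h len cur hv : Int),
    h = calculate_hash chain → len = (chain.length : Int) →
    2 ≤ cur → cur + (fuel : Int) ≤ 114 →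
    chainLoopB fuel chain h len cur hv = chainLoopA fuel chain cur hv := by
  intro fuel
  induction fuel with
  | zero => intro chain h len cur hv _ _ _ _; rfl
  | succ fuel ih =>
    intro chain h len cur hv hh hl hcur hbound
    have hagree : altIsPrime cur = pyIsPrime cur := by
      have hk : cur = 2 + ((cur - 2).toNat : Int) := by omega
      rw [hk]
      exact prime_agree (cur - 2).toNat (by push_cast at hbound ⊢; omega)
    rw [chainLoopB, chainLoopA, hh, hl, hagree]
    by_cases hlen : ((chain.length : Int) < 48)
    · simp only [if_pos hlen]
      by_cases hp : pyIsPrime cur = true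
      · simp only [hp, if_pos]
        rw [PySem.List.foldl_prod_mk
              (f := fun h (digit : Char) => PySem.Int.mod (h * 13 + pyIntChar digit) 100000007)
              (g := fun l (_ : Char) => l + 1)]
        rw [PySem.List.foldl_add (g := fun (_ : Char) => (1 : Int))]
        rw [← calcHash_append]
        by_cases hfound :
            (calculate_hash (chain ++ PySem.Int.toChars cur) == hv) = true
        · simp [hfound]
        · simp only [Bool.not_eq_true] at hfound
          simp only [hfound, Bool.false_eq_true, if_false]
          apply ih
          · rfl
          · simp
          · omega
          · push_cast at hbound ⊢; omega
      · simp only [Bool.not_eq_true] at hp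
        simp only [hp, Bool.false_eq_true, if_false]
        exact ih _ _ _ _ _ rfl rfl (by omega) (by push_cast at hbound ⊢; omega)
    · rw [if_neg hlen, if_neg hlen]

-- ===== VERDICT (by name: the statement is the Claim_ definition above) =====
theorem find_prime_chain_spec : Claim_equal_find_prime_chain := by
  intro hv _
  unfold Spec_find_prime_chain find_prime_chain find_prime_chain_alt
  rw [loop_eq 110 [] 0 0 2 hv rfl rfl (by norm_num) (by norm_num)]
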